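-- pv_equiv track=rewrite | github.com/AdamBoucquemont/MOOC_project | Section 5/all_exemples.py | n_double_non_consecutifs
-- ===== SOURCE A (Python) =====
-- def n_double_non_consecutifs(mot, n):
--    """renvoie vrai si le mot contient n double lettres
--       éventuellement non consécutives"""
--
--    i = 0
--    long = len(mot)
--    cont = 0
--    while cont < n and i < long - 1:
--        if mot[i] == mot[i + 1]:
--            cont += 1
--            i += 2
--        else:
--            i += 1
--    return cont == n
-- ===== SOURCE B (Python) =====
-- def n_double_non_consecutifs(mot, n):
--     # Run-length decomposition: a maximal run of L equal letters contributes
--     # L // 2 non-overlapping doubles; compare n against the total.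
--     total = 0
--     i = 0
--     L = len(mot)
--     while i < L:
--         k = i + 1
--         while k < L and mot[k] == mot[i]:
--             k += 1
--         total += (k - i) // 2
--         i = k
--     return 0 <= n <= total
-- ===== Notes on version B (the rewrite author's own statement) =====
-- stated objective: alternative
-- what changed: Replaces A's greedy single-index pair-skipping scan by a run-length decomposition: the word is split into maximal runs of equal letters, each run of length L contributes L//2 doubles, and the result is the predicate 0 <= n <= total.
import Mathlib
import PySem

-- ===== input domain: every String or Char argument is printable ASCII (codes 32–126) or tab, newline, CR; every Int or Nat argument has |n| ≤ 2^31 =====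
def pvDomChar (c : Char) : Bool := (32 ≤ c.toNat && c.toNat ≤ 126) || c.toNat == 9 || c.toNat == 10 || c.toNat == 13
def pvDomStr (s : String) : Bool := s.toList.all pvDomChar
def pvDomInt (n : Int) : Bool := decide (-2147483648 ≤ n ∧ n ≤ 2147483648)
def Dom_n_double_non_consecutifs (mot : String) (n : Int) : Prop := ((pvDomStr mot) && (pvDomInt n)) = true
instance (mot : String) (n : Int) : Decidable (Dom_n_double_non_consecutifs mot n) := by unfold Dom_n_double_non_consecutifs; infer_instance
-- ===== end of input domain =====

-- B replaces A's greedy single-index pair-skipping scan by a run-length decomposition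
-- (each maximal run of L equal letters contributes L / 2 doubles) and returns the
-- predicate 0 ≤ n ≤ total; objective: alternative algorithm of the same cost.


-- ===== PORT A =====
-- the while loop: state (i, cont); condition cont < n ∧ i < long - 1 (i ≥ 0 always, so Nat)
def pvLoopA (s : List Char) (n : Int) (i : Nat) (cont : Int) : Bool :=
  if cont < n ∧ i + 1 < s.length then
    if s.getD i ' ' == s.getD (i + 1) ' ' then pvLoopA s n (i + 2) (cont + 1)
    else pvLoopA s n (i + 1) cont
  else cont == n
termination_by s.length - i

def n_double_non_consecutifs (mot : String) (n : Int) : Bool :=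
  pvLoopA mot.toList n 0 0

-- ===== PORT B =====
-- inner while loop: count of leading characters of the tail equal to c (k - (i+1) in Source B)
def pvRun (c : Char) : List Char → Nat
  | [] => 0
  | x :: r => if x == c then 1 + pvRun c r else 0

-- outer while loop: state (i, total); k = i + 1 + run; total += (k - i) // 2
-- (k - i ≥ 1, so Nat division equals Python's // on these nonnegative values)
def pvOuter (s : List Char) (i : Nat) (total : Int) : Int :=
  if i < s.length then
    let k := i + 1 + pvRun (s.getD i ' ') (s.drop (i + 1))
    pvOuter s k (total + (((k - i) / 2 : Nat) : Int))
  else total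
termination_by s.length - i
decreasing_by omega

def n_double_non_consecutifs_alt (mot : String) (n : Int) : Bool :=
  decide (0 ≤ n ∧ n ≤ pvOuter mot.toList 0 0)

-- ===== PRECONDITION & SPEC =====
def Spec_n_double_non_consecutifs (mot : String) (n : Int) (out : Bool) : Prop := out = n_double_non_consecutifs_alt mot n
instance (mot : String) (n : Int) (out : Bool) : Decidable (Spec_n_double_non_consecutifs mot n out) := by unfold Spec_n_double_non_consecutifs; infer_instance

-- ===== CLAIM (what is proved, stated in full; the proofs are below) =====
def Claim_equal_n_double_non_consecutifs : Prop := ∀ (mot : String) (n : Int), Dom_n_double_non_consecutifs mot n → Spec_n_double_non_consecutifs mot n (n_double_non_consecutifs mot n)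

-- ===== LEMMAS AND PROOFS =====

-- proof-side characterisation: greedy count of non-overlapping doubled letters
def pvGd : List Char → Int
  | a :: b :: r => if a == b then 1 + pvGd r else pvGd (b :: r)
  | _ => 0
termination_by s => s.length

theorem pvGd_nonneg : ∀ s : List Char, 0 ≤ pvGd s
  | [] => by simp [pvGd]
  | [_] => by simp [pvGd]
  | a :: b :: r => by
      simp only [pvGd]
      split
      · have := pvGd_nonneg r; omega
      · exact pvGd_nonneg (b :: r)
termination_by s => s.length

theorem pvGd_short (s : List Char) (h : s.length ≤ 1) : pvGd s = 0 := by
  match s, h with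
  | [], _ => simp [pvGd]
  | [_], _ => simp [pvGd]

-- a maximal leading run of 1 + pvRun c r letters c contributes (1 + pvRun c r) / 2 doubles
theorem pvGd_run : ∀ (r : List Char) (c : Char),
    pvGd (c :: r) = (((1 + pvRun c r) / 2 : Nat) : Int) + pvGd (r.drop (pvRun c r))
  | [], c => by simp [pvRun, pvGd]
  | b :: r', c => by
      by_cases h : b = c
      · subst h
        have hrun : pvRun b (b :: r') = 1 + pvRun b r' := by simp [pvRun]
        rw [hrun]
        have hgd : pvGd (b :: b :: r') = 1 + pvGd r' := by simp [pvGd]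
        rw [hgd]
        match r' with
        | [] => simp [pvRun, pvGd]
        | d :: r'' =>
          by_cases h2 : d = b
          · subst h2
            have hrun2 : pvRun d (d :: r'') = 1 + pvRun d r'' := by simp [pvRun]
            rw [hrun2]
            have ih := pvGd_run r'' d
            have hdrop : List.drop (1 + (1 + pvRun d r'')) (d :: d :: r'')
                = r''.drop (pvRun d r'') := by
              have h3 : 1 + (1 + pvRun d r'') = pvRun d r'' + 1 + 1 := by omega
              rw [h3, List.drop_succ_cons, List.drop_succ_cons]
            rw [hdrop]
            have hcast : (((1 + (1 + (1 + pvRun d r''))) / 2 : Nat) : Int)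
                = 1 + (((1 + pvRun d r'') / 2 : Nat) : Int) := by
              have h4 : (1 + (1 + (1 + pvRun d r''))) / 2 = 1 + (1 + pvRun d r'') / 2 := by omega
              rw [h4]; push_cast; ring
            rw [hcast, ih]; ring
          · have hrun2 : pvRun b (d :: r'') = 0 := by simp [pvRun, h2]
            rw [hrun2]
            have hne : (b == d) = false := by simp; exact fun hc => h2 hc.symm
            simp [pvGd, hne]
      · have hrun : pvRun c (b :: r') = 0 := by
          simp [pvRun]; intro hb; exact absurd hb h
        rw [hrun]
        have hne : (c == b) = false := by simp; exact fun hc => h hc.symm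
        simp [pvGd, hne]
termination_by r c => r.length

-- B's outer loop accumulates total + pvGd of the remaining suffix
theorem pvOuter_gd : ∀ (s : List Char) (i : Nat) (total : Int),
    pvOuter s i total = total + pvGd (s.drop i) := by
  intro s i total
  rw [pvOuter]
  by_cases h : i < s.length
  · simp only [if_pos h]
    have hdrop : s.drop i = s[i] :: s.drop (i + 1) := List.drop_eq_getElem_cons h
    have hga : s.getD i ' ' = s[i] := List.getD_eq_getElem s ' ' h
    set m := pvRun (s.getD i ' ') (s.drop (i + 1)) with hm
    have hk : i + 1 + m - i = 1 + m := by omega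
    rw [pvOuter_gd s (i + 1 + m) (total + (((i + 1 + m - i) / 2 : Nat) : Int))]
    have hdd : s.drop (i + 1 + m) = (s.drop (i + 1)).drop m := by
      rw [List.drop_drop, Nat.add_comm]
    rw [hdd, hk, hdrop, pvGd_run (s.drop (i + 1)) s[i]]
    rw [hm, hga]
    ring
  · simp only [if_neg h]
    have : s.drop i = [] := List.drop_eq_nil_of_le (by omega)
    simp [this, pvGd]
termination_by s i total => s.length - i
decreasing_by omega

-- A's loop returns decide (cont ≤ n ∧ n ≤ cont + pvGd (s.drop i))
theorem loopA_gd : ∀ (s : List Char) (n : Int) (i : Nat) (cont : Int),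
    pvLoopA s n i cont = decide (cont ≤ n ∧ n ≤ cont + pvGd (s.drop i)) := by
  intro s n i cont
  rw [pvLoopA]
  by_cases hc : cont < n ∧ i + 1 < s.length
  · obtain ⟨h1, h2⟩ := hc
    have hi : i < s.length := by omega
    have hdrop : s.drop i = s[i] :: s.drop (i + 1) := List.drop_eq_getElem_cons hi
    have hdrop2 : s.drop (i + 1) = s[i + 1] :: s.drop (i + 2) := List.drop_eq_getElem_cons h2
    have hga : s.getD i ' ' = s[i] := List.getD_eq_getElem s ' ' hi
    have hgb : s.getD (i + 1) ' ' = s[i + 1] := List.getD_eq_getElem s ' ' h2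
    simp only [if_pos (And.intro h1 h2), hga, hgb]
    by_cases he : s[i] = s[i + 1]
    · simp only [he, beq_self_eq_true, if_true]
      rw [loopA_gd s n (i + 2) (cont + 1)]
      have hg : pvGd (s.drop i) = 1 + pvGd (s.drop (i + 2)) := by
        rw [hdrop, hdrop2, pvGd]; simp [he]
      rw [hg, decide_eq_decide]
      have hgn := pvGd_nonneg (s.drop (i + 2))
      omega
    · have hb : (s[i] == s[i + 1]) = false := by simp [he]
      simp only [hb, Bool.false_eq_true, if_false]
      rw [loopA_gd s n (i + 1) cont]
      have hg : pvGd (s.drop i) = pvGd (s.drop (i + 1)) := by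
        rw [hdrop, hdrop2, pvGd]; simp [he, ← hdrop2]
      rw [hg]
  · simp only [if_neg hc]
    rw [Bool.eq_iff_iff]
    simp only [beq_iff_eq, decide_eq_true_eq]
    rcases not_and_or.mp hc with h | h
    · have hgn := pvGd_nonneg (s.drop i)
      omega
    · have hg : pvGd (s.drop i) = 0 := pvGd_short _ (by
        have := List.length_drop (l := s) (i := i); omega)
      rw [hg]; omega
termination_by s n i => s.length - i
decreasing_by all_goals omega

-- ===== VERDICT (by name: the statement is the Claim_ definition above) =====
theorem n_double_non_consecutifs_spec : Claim_equal_n_double_non_consecutifs := by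
  intro mot n _
  show n_double_non_consecutifs mot n = n_double_non_consecutifs_alt mot n
  unfold n_double_non_consecutifs n_double_non_consecutifs_alt
  rw [loopA_gd, pvOuter_gd, List.drop_zero]
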